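-- pv_equiv track=rewrite | github.com/skrix/ap_p2_labs_iot_nulp | src/lab6/level2.py | compose_tribes
-- ===== SOURCE A (Python) =====
-- def compose_tribes(relations):
--     visited = set()
--     tribes = []
--
--     for member in relations:
--         if member in visited:
--             continue
--
--         stack = [member]
--         visited.add(member)
--         boys_count = 0
--         girls_count = 0
--
--         while stack:
--             current = stack.pop()
--             if is_girl(current):
--                 girls_count += 1
--             else:
--                 boys_count += 1
--
--             for neighbor in relations[current]:
--                 if neighbor not in visited:
--                     visited.add(neighbor)
--                     stack.append(neighbor)
--
--         tribes.append((boys_count, girls_count))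
--     return tribes
--
-- def is_girl(number):
--     return bool(number % 2)
-- ===== SOURCE B (Python) =====
-- def compose_tribes(relations):
--     tribes = []
--     seen = set()
--     for member in relations:
--         if member in seen:
--             continue
--         seen.add(member)
--         comp = [member]
--         frontier = [member]
--         while frontier:
--             nxt = []
--             for node in frontier:
--                 for neighbor in relations[node]:
--                     if neighbor not in seen:
--                         seen.add(neighbor)
--                         comp.append(neighbor)
--                         nxt.append(neighbor)
--             frontier = nxt
--         girls = sum(1 for x in comp if x % 2 != 0)
--         tribes.append((len(comp) - girls, girls))
--     return tribes
-- ===== Notes on version B (the rewrite author's own statement) =====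
-- stated objective: alternative
-- what changed: Replaces A's depth-first stack traversal with interleaved boy/girl counters by breadth-first frontier saturation that first collects each component as a list and then tallies parities in a separate counting pass.
import Mathlib
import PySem

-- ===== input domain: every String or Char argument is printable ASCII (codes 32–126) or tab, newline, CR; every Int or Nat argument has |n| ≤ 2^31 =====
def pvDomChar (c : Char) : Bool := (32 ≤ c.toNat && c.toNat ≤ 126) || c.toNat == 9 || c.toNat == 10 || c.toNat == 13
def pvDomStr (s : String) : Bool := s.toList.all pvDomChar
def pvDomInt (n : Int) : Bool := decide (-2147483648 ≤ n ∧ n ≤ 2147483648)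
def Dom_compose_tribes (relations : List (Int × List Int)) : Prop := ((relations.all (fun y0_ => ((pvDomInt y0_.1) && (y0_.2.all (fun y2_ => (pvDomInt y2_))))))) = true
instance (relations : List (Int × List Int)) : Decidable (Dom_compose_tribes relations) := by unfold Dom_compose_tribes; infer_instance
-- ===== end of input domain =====

-- B replaces A's depth-first stack walk (inline parity counters) by breadth-first
-- frontier saturation that first collects each component as a list, then counts
-- parities in a separate pass; objective: alternative (same exact output).

-- ===== PORT A =====
-- helpers shared by the termination arguments of both ports:
-- `univ d` = all ints mentioned by the dict, `unv d v` = how many are not yet visited.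
def pvUniv (d : PySem.Dict Int (List Int)) : List Int :=
  PySem.List.dedup (d.keys ++ d.values.flatten)

def pvUnv (d : PySem.Dict Int (List Int)) (v : List Int) : Nat :=
  ((pvUniv d).filter (fun x => decide (x ∉ v))).length

lemma pvGetD_mem_univ (d : PySem.Dict Int (List Int)) (k : Int) :
    ∀ y ∈ d.getD k [], y ∈ pvUniv d := by
  intro y hy
  rw [PySem.Dict.getD_eq_get?_getD] at hy
  cases h : d.get? k with
  | none => rw [h] at hy; simp at hy
  | some vs =>
    rw [h] at hy
    simp only [Option.getD_some] at hy
    have hv : vs ∈ d.values := by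
      have := PySem.Dict.mem_items_of_get?_eq_some d h
      unfold PySem.Dict.values
      exact List.mem_map_of_mem this
    unfold pvUniv
    rw [PySem.List.mem_dedup]
    exact List.mem_append_right _ (List.mem_flatten.2 ⟨vs, hv, hy⟩)

lemma pvUnv_append (d : PySem.Dict Int (List Int)) (v new : List Int)
    (h : ∀ x ∈ new, x ∈ pvUniv d ∧ x ∉ v) (hnd : new.Nodup) :
    pvUnv d (v ++ new) + new.length = pvUnv d v := by
  unfold pvUnv
  have h1 : (pvUniv d).filter (fun x => decide (x ∉ v ++ new))
      = ((pvUniv d).filter (fun x => decide (x ∉ v))).filter (fun x => decide (x ∉ new)) := by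
    rw [List.filter_filter]
    apply List.filter_congr
    intro x _
    by_cases hxv : x ∈ v <;> by_cases hxn : x ∈ new <;> simp [hxv, hxn]
  rw [h1]
  set L := (pvUniv d).filter (fun x => decide (x ∉ v)) with hL
  have hLnd : L.Nodup := List.Nodup.filter _ (PySem.List.nodup_dedup _)
  have h2 : (L.filter (fun x => decide (x ∈ new))).length = new.length := by
    have hperm : (L.filter (fun x => decide (x ∈ new))).Perm new := by
      rw [List.perm_ext_iff_of_nodup (List.Nodup.filter _ hLnd) hnd]
      intro a
      simp only [List.mem_filter, decide_eq_true_eq]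
      constructor
      · exact fun ha => ha.2
      · intro ha
        refine ⟨?_, ha⟩
        rw [hL, List.mem_filter]
        exact ⟨(h a ha).1, by simp [(h a ha).2]⟩
    exact hperm.length_eq
  have h3 : (L.filter (fun x => decide (x ∉ new))).length
      + (L.filter (fun x => decide (x ∈ new))).length = L.length := by
    have e1 : L.filter (fun x => decide (x ∉ new)) = L.filter (fun x => !decide (x ∈ new)) := by
      apply List.filter_congr
      intro x _
      by_cases hx : x ∈ new <;> simp [hx]
    rw [e1, ← List.countP_eq_length_filter, ← List.countP_eq_length_filter]
    have h4 := List.length_eq_countP_add_countP (p := fun x => decide (x ∈ new)) (l := L)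
    simp only [decide_not, decide_eq_true_eq] at h4
    omega
  omega

def is_girl (number : Int) : Bool := PySem.Int.mod number 2 != 0

-- the inner `for neighbor in relations[current]` loop of A (stack top kept at the list head)
def pvPushA (v : PySem.Set Int) (st : List Int) (adj : List Int) : PySem.Set Int × List Int :=
  adj.foldl (fun p nb =>
    if PySem.Set.contains p.1 nb then p
    else (PySem.Set.add p.1 nb, nb :: p.2)) (v, st)

lemma pvPushA_spec (v : PySem.Set Int) (st adj : List Int) :
    ∃ new, pvPushA v st adj = (v ++ new, new.reverse ++ st) ∧ new.Nodup ∧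
      (∀ x ∈ new, x ∈ adj ∧ x ∉ v) ∧ (∀ y ∈ adj, y ∈ v ++ new) := by
  induction adj generalizing v st with
  | nil => exact ⟨[], by simp [pvPushA]⟩
  | cons a tl ih =>
    simp only [pvPushA] at ih ⊢
    rw [List.foldl_cons]
    by_cases ha : a ∈ v
    · have hc : PySem.Set.contains v a = true := (PySem.Set.contains_iff v a).2 ha
      simp only [hc, if_true]
      obtain ⟨new, heq, hnd, hmem, hall⟩ := ih v st
      exact ⟨new, heq, hnd,
        fun x hx => ⟨List.mem_cons_of_mem _ (hmem x hx).1, (hmem x hx).2⟩,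
        by
          intro y hy
          rcases List.mem_cons.1 hy with rfl | hy'
          · exact List.mem_append_left _ ha
          · exact hall y hy'⟩
    · have hc : PySem.Set.contains v a = false := by
        rw [← Bool.not_eq_true, PySem.Set.contains_iff]; exact ha
      have hadd : PySem.Set.add v a = v ++ [a] := by
        simp [ha]
      simp only [hc, Bool.false_eq_true, if_false, hadd]
      obtain ⟨new, heq, hnd, hmem, hall⟩ := ih (v ++ [a]) (a :: st)
      refine ⟨a :: new, ?_, ?_, ?_, ?_⟩
      · rw [heq]; simp
      · refine List.Nodup.cons ?_ hnd
        intro hmem'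
        exact ((hmem a hmem').2) (by simp)
      · intro x hx
        rcases List.mem_cons.1 hx with rfl | hx'
        · exact ⟨List.mem_cons_self, ha⟩
        · have := hmem x hx'
          exact ⟨List.mem_cons_of_mem _ this.1, fun hv => this.2 (List.mem_append_left _ hv)⟩
      · intro y hy
        rcases List.mem_cons.1 hy with rfl | hy'
        · simp
        · have := hall y hy'
          simp only [List.append_assoc, List.singleton_append] at this ⊢
          exact this

def pvDfsA (d : PySem.Dict Int (List Int)) (stack : List Int) (v : PySem.Set Int)
    (b g : Int) : Int × Int × PySem.Set Int :=
  match stack with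
  | [] => (b, g, v)
  | current :: rest =>
    let p := pvPushA v rest (d.getD current [])
    if is_girl current then pvDfsA d p.2 p.1 b (g + 1)
    else pvDfsA d p.2 p.1 (b + 1) g
termination_by 2 * pvUnv d v + stack.length
decreasing_by
  all_goals
    obtain ⟨new, heq, hnd, hmem, -⟩ := pvPushA_spec v rest (d.getD current [])
    have h1 : pvUnv d (v ++ new) + new.length = pvUnv d v :=
      pvUnv_append d v new
        (fun x hx => ⟨pvGetD_mem_univ d current x (hmem x hx).1, (hmem x hx).2⟩) hnd
    simp only [heq, List.length_append, List.length_reverse, List.length_cons]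
    omega

def pvOuterA (d : PySem.Dict Int (List Int)) : List Int → PySem.Set Int → List (Int × Int) → List (Int × Int)
  | [], _, tribes => tribes
  | m :: ms, visited, tribes =>
    if PySem.Set.contains visited m then pvOuterA d ms visited tribes
    else
      let r := pvDfsA d [m] (PySem.Set.add visited m) 0 0
      pvOuterA d ms r.2.2 (tribes ++ [(r.1, r.2.1)])

def compose_tribes (relations : List (Int × List Int)) : List (Int × Int) :=
  let d := PySem.Dict.ofList relations
  pvOuterA d d.keys PySem.Set.empty []

-- ===== PORT B =====
-- B: breadth-first saturation; `pvStepB` is the inner `for neighbor in relations[node]`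
-- loop, `pvLevelB` one `for node in frontier` pass, `pvBfsB` the `while frontier` loop.
def pvStepB (d : PySem.Dict Int (List Int)) (node : Int)
    (s : PySem.Set Int × List Int × List Int) : PySem.Set Int × List Int × List Int :=
  (d.getD node []).foldl (fun s nb =>
    if PySem.Set.contains s.1 nb then s
    else (PySem.Set.add s.1 nb, s.2.1 ++ [nb], s.2.2 ++ [nb])) s

def pvLevelB (d : PySem.Dict Int (List Int)) (frontier : List Int)
    (seen : PySem.Set Int) (comp : List Int) : PySem.Set Int × List Int × List Int :=
  frontier.foldl (fun s node => pvStepB d node s) (seen, comp, [])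

lemma pvStepB_spec (d : PySem.Dict Int (List Int)) (node : Int)
    (seen : PySem.Set Int) (comp nxt : List Int) :
    ∃ new, pvStepB d node (seen, comp, nxt) = (seen ++ new, comp ++ new, nxt ++ new) ∧
      new.Nodup ∧ (∀ x ∈ new, x ∈ d.getD node [] ∧ x ∉ seen) ∧
      (∀ y ∈ d.getD node [], y ∈ seen ++ new) := by
  unfold pvStepB
  generalize d.getD node [] = adj
  induction adj generalizing seen comp nxt with
  | nil => exact ⟨[], by simp⟩
  | cons a tl ih =>
    rw [List.foldl_cons]
    by_cases ha : a ∈ seen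
    · have hc : PySem.Set.contains seen a = true := (PySem.Set.contains_iff seen a).2 ha
      simp only [hc, if_true]
      obtain ⟨new, heq, hnd, hmem, hall⟩ := ih seen comp nxt
      refine ⟨new, heq, hnd,
        fun x hx => ⟨List.mem_cons_of_mem _ (hmem x hx).1, (hmem x hx).2⟩, ?_⟩
      intro y hy
      rcases List.mem_cons.1 hy with rfl | hy'
      · exact List.mem_append_left _ ha
      · exact hall y hy'
    · have hc : PySem.Set.contains seen a = false := by
        rw [← Bool.not_eq_true, PySem.Set.contains_iff]; exact ha
      have hadd : PySem.Set.add seen a = seen ++ [a] := by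
        simp [ha]
      simp only [hc, Bool.false_eq_true, if_false, hadd]
      obtain ⟨new, heq, hnd, hmem, hall⟩ := ih (seen ++ [a]) (comp ++ [a]) (nxt ++ [a])
      refine ⟨a :: new, ?_, ?_, ?_, ?_⟩
      · rw [heq]; simp
      · refine List.Nodup.cons (fun hmem' => (hmem a hmem').2 (by simp)) hnd
      · intro x hx
        rcases List.mem_cons.1 hx with rfl | hx'
        · exact ⟨List.mem_cons_self, ha⟩
        · have := hmem x hx'
          exact ⟨List.mem_cons_of_mem _ this.1, fun hv => this.2 (List.mem_append_left _ hv)⟩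
      · intro y hy
        rcases List.mem_cons.1 hy with rfl | hy'
        · simp
        · have := hall y hy'
          simp only [List.append_assoc, List.singleton_append] at this ⊢
          exact this

lemma pvLevelFold_spec (d : PySem.Dict Int (List Int)) (frontier : List Int)
    (seen : PySem.Set Int) (comp nxt : List Int) :
    ∃ new, frontier.foldl (fun s node => pvStepB d node s) (seen, comp, nxt)
        = (seen ++ new, comp ++ new, nxt ++ new) ∧
      new.Nodup ∧ (∀ x ∈ new, x ∉ seen ∧ ∃ nd ∈ frontier, x ∈ d.getD nd []) ∧
      (∀ nd ∈ frontier, ∀ y ∈ d.getD nd [], y ∈ seen ++ new) := by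
  induction frontier generalizing seen comp nxt with
  | nil => exact ⟨[], by simp⟩
  | cons nd tl ih =>
    rw [List.foldl_cons]
    obtain ⟨new0, heq0, hnd0, hmem0, hall0⟩ := pvStepB_spec d nd seen comp nxt
    rw [heq0]
    obtain ⟨new1, heq1, hnd1, hmem1, hall1⟩ := ih (seen ++ new0) (comp ++ new0) (nxt ++ new0)
    refine ⟨new0 ++ new1, ?_, ?_, ?_, ?_⟩
    · rw [heq1]; simp
    · exact List.Nodup.append hnd0 hnd1
        (fun x hx0 hx1 => (hmem1 x hx1).1 (List.mem_append_right _ hx0))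
    · intro x hx
      rcases List.mem_append.1 hx with hx0 | hx1
      · exact ⟨(hmem0 x hx0).2, nd, List.mem_cons_self, (hmem0 x hx0).1⟩
      · obtain ⟨hns, nd', hnd', hadj⟩ := hmem1 x hx1
        exact ⟨fun hs => hns (List.mem_append_left _ hs), nd', List.mem_cons_of_mem _ hnd', hadj⟩
    · intro nd' hnd'' y hy
      rcases List.mem_cons.1 hnd'' with rfl | htl
      · have := hall0 y hy
        rcases List.mem_append.1 this with h | h
        · exact List.mem_append_left _ h
        · exact List.mem_append_right _ (List.mem_append_left _ h)
      · have := hall1 nd' htl y hy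
        simpa [List.append_assoc] using this

lemma pvLevelB_spec (d : PySem.Dict Int (List Int)) (frontier : List Int)
    (seen : PySem.Set Int) (comp : List Int) :
    ∃ new, pvLevelB d frontier seen comp = (seen ++ new, comp ++ new, new) ∧
      new.Nodup ∧ (∀ x ∈ new, x ∉ seen ∧ ∃ nd ∈ frontier, x ∈ d.getD nd []) ∧
      (∀ nd ∈ frontier, ∀ y ∈ d.getD nd [], y ∈ seen ++ new) := by
  obtain ⟨new, heq, h1, h2, h3⟩ := pvLevelFold_spec d frontier seen comp []
  exact ⟨new, by simpa [pvLevelB] using heq, h1, h2, h3⟩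

def pvBfsB (d : PySem.Dict Int (List Int)) (frontier : List Int)
    (seen : PySem.Set Int) (comp : List Int) : PySem.Set Int × List Int :=
  match frontier with
  | [] => (seen, comp)
  | _ :: _ =>
    let s := pvLevelB d frontier seen comp
    pvBfsB d s.2.2 s.1 s.2.1
termination_by (pvUnv d seen, frontier.length)
decreasing_by
  obtain ⟨new, heq, hnd, hmem, -⟩ := pvLevelB_spec d frontier seen comp
  have h1 : pvUnv d (seen ++ new) + new.length = pvUnv d seen := by
    refine pvUnv_append d seen new (fun x hx => ?_) hnd
    obtain ⟨hx1, nd, -, hadj⟩ := hmem x hx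
    exact ⟨pvGetD_mem_univ d nd x hadj, hx1⟩
  simp only [heq]
  cases new with
  | nil =>
    simp only [List.append_nil]
    exact Prod.Lex.right _ (by simp)
  | cons a tl =>
    apply Prod.Lex.left
    simp only [List.length_cons] at h1
    omega

def pvOuterB (d : PySem.Dict Int (List Int)) : List Int → PySem.Set Int → List (Int × Int) → List (Int × Int)
  | [], _, tribes => tribes
  | m :: ms, seen, tribes =>
    if PySem.Set.contains seen m then pvOuterB d ms seen tribes
    else
      let r := pvBfsB d [m] (PySem.Set.add seen m) [m]
      let girls : Int := ((r.2.filter (fun x => PySem.Int.mod x 2 != 0)).length : Int)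
      pvOuterB d ms r.1 (tribes ++ [((r.2.length : Int) - girls, girls)])

def compose_tribes_alt (relations : List (Int × List Int)) : List (Int × Int) :=
  let d := PySem.Dict.ofList relations
  pvOuterB d d.keys PySem.Set.empty []

-- ===== PRECONDITION & SPEC =====
-- Pre_ excludes inputs where some neighbour listed in the dict (duplicate keys keep
-- only the last value) is not itself a key: there Python A (and Python B alike)
-- raises KeyError when it expands that node.
def Pre_compose_tribes (relations : List (Int × List Int)) : Prop :=
  ∀ vs ∈ (PySem.Dict.ofList relations).values, ∀ n ∈ vs, n ∈ relations.map Prod.fst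

instance (relations : List (Int × List Int)) : Decidable (Pre_compose_tribes relations) := by
  unfold Pre_compose_tribes; infer_instance

def pvWitness_compose_tribes : (List (Int × List Int)) := [(191, [277]), (277, [191]), (-83, [])]

def Spec_compose_tribes (relations : List (Int × List Int)) (out : List (Int × Int)) : Prop := out = compose_tribes_alt relations
instance (relations : List (Int × List Int)) (out : List (Int × Int)) : Decidable (Spec_compose_tribes relations out) := by unfold Spec_compose_tribes; infer_instance

-- ===== CLAIM (what is proved, stated in full; the proofs are below) =====
def Claim_equal_compose_tribes : Prop := ∀ (relations : List (Int × List Int)), Dom_compose_tribes relations → Pre_compose_tribes relations → Spec_compose_tribes relations (compose_tribes relations)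

-- ===== LEMMAS AND PROOFS =====

def pvGirlsN (l : List Int) : Nat := l.countP (fun x => is_girl x)
def pvBoysN (l : List Int) : Nat := l.countP (fun x => !is_girl x)

set_option maxHeartbeats 1000000 in
-- master invariant for A's stack walk
lemma pvDfsA_master (d : PySem.Dict Int (List Int)) (stack : List Int) (v : PySem.Set Int)
    (b g : Int) :
    (∀ x ∈ stack, x ∈ v) → stack.Nodup → v.Nodup →
    ∃ new, pvDfsA d stack v b g
        = (b + (pvBoysN (stack ++ new) : Int), g + (pvGirlsN (stack ++ new) : Int), v ++ new) ∧
      new.Nodup ∧ (∀ x ∈ new, x ∉ v) ∧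
      (∀ x ∈ stack ++ new, ∀ y ∈ d.getD x [], y ∈ v ++ new) ∧
      (∀ (P : Int → Prop), (∀ x ∈ stack, P x) →
        (∀ x y, P x → y ∈ d.getD x [] → y ∉ v → P y) → ∀ x ∈ new, P x) := by
  fun_induction pvDfsA d stack v b g with
  | case1 v b g =>
    intro _ _ _
    refine ⟨[], by simp [pvBoysN, pvGirlsN], by simp, by simp, by simp, by simp⟩
  | case2 v b g current rest p hgirl ih =>
    have hic : is_girl current = true := hgirl
    intro hsv hsnd hvnd
    obtain ⟨new0, heq0, hnd0, hmem0, hall0⟩ := pvPushA_spec v rest (d.getD current [])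
    have hp : p = (v ++ new0, new0.reverse ++ rest) := heq0
    simp only [hp] at ih ⊢
    have hrest : ∀ x ∈ rest, x ∈ v := fun x hx => hsv x (List.mem_cons_of_mem _ hx)
    have hcur : current ∈ v := hsv current List.mem_cons_self
    have hdisj0 : ∀ x ∈ new0, x ∉ v := fun x hx => (hmem0 x hx).2
    have hsv' : ∀ x ∈ new0.reverse ++ rest, x ∈ v ++ new0 := by
      intro x hx
      rcases List.mem_append.1 hx with h | h
      · exact List.mem_append_right _ (List.mem_reverse.1 h)
      · exact List.mem_append_left _ (hrest x h)
    have hsnd' : (new0.reverse ++ rest).Nodup :=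
      List.Nodup.append (List.nodup_reverse.2 hnd0) (List.Nodup.of_cons hsnd)
        (fun x hx hxr => hdisj0 x (List.mem_reverse.1 hx) (hrest x hxr))
    have hvnd' : (v ++ new0).Nodup :=
      List.Nodup.append hvnd hnd0 (fun x hx hx0 => hdisj0 x hx0 hx)
    obtain ⟨new1, heq1, hnd1, hmem1, hclo1, hsound1⟩ := ih hsv' hsnd' hvnd'
    refine ⟨new0 ++ new1, ?_, ?_, ?_, ?_, ?_⟩
    · rw [heq1]
      simp only [Prod.mk.injEq]
      refine ⟨?_, ?_, List.append_assoc v new0 new1⟩ <;>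
        · simp only [pvBoysN, pvGirlsN, List.countP_append, List.cons_append,
            List.countP_cons, List.countP_reverse]
          simp [hic]
          omega
    · exact List.Nodup.append hnd0 hnd1
        (fun x hx0 hx1 => hmem1 x hx1 (List.mem_append_right _ hx0))
    · intro x hx
      rcases List.mem_append.1 hx with h | h
      · exact hdisj0 x h
      · exact fun hv => hmem1 x h (List.mem_append_left _ hv)
    · intro x hx y hy
      have key : x = current ∨ x ∈ (new0.reverse ++ rest) ++ new1 := by
        simp only [List.cons_append, List.mem_cons, List.mem_append, List.mem_reverse] at hx ⊢
        tauto
      rcases key with rfl | hx'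
      · have h2 := hall0 y hy
        rcases List.mem_append.1 h2 with h | h
        · exact List.mem_append_left _ h
        · exact List.mem_append_right _ (List.mem_append_left _ h)
      · have := hclo1 x hx' y hy
        simpa [List.append_assoc] using this
    · intro P hroot hcl x hx
      rcases List.mem_append.1 hx with h | h
      · exact hcl current x (hroot current List.mem_cons_self) (hmem0 x h).1 (hmem0 x h).2
      · refine hsound1 P ?_ ?_ x h
        · intro z hz
          rcases List.mem_append.1 hz with hz' | hz'
          · have hz0 := List.mem_reverse.1 hz'
            exact hcl current z (hroot current List.mem_cons_self) (hmem0 z hz0).1 (hmem0 z hz0).2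
          · exact hroot z (List.mem_cons_of_mem _ hz')
        · intro a y hPa hy hnv
          exact hcl a y hPa hy (fun hv => hnv (List.mem_append_left _ hv))
  | case3 v b g current rest p hgirl ih =>
    have hic : is_girl current = false := by revert hgirl; cases is_girl current <;> simp
    intro hsv hsnd hvnd
    obtain ⟨new0, heq0, hnd0, hmem0, hall0⟩ := pvPushA_spec v rest (d.getD current [])
    have hp : p = (v ++ new0, new0.reverse ++ rest) := heq0
    simp only [hp] at ih ⊢
    have hrest : ∀ x ∈ rest, x ∈ v := fun x hx => hsv x (List.mem_cons_of_mem _ hx)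
    have hcur : current ∈ v := hsv current List.mem_cons_self
    have hdisj0 : ∀ x ∈ new0, x ∉ v := fun x hx => (hmem0 x hx).2
    have hsv' : ∀ x ∈ new0.reverse ++ rest, x ∈ v ++ new0 := by
      intro x hx
      rcases List.mem_append.1 hx with h | h
      · exact List.mem_append_right _ (List.mem_reverse.1 h)
      · exact List.mem_append_left _ (hrest x h)
    have hsnd' : (new0.reverse ++ rest).Nodup :=
      List.Nodup.append (List.nodup_reverse.2 hnd0) (List.Nodup.of_cons hsnd)
        (fun x hx hxr => hdisj0 x (List.mem_reverse.1 hx) (hrest x hxr))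
    have hvnd' : (v ++ new0).Nodup :=
      List.Nodup.append hvnd hnd0 (fun x hx hx0 => hdisj0 x hx0 hx)
    obtain ⟨new1, heq1, hnd1, hmem1, hclo1, hsound1⟩ := ih hsv' hsnd' hvnd'
    refine ⟨new0 ++ new1, ?_, ?_, ?_, ?_, ?_⟩
    · rw [heq1]
      simp only [Prod.mk.injEq]
      refine ⟨?_, ?_, List.append_assoc v new0 new1⟩ <;>
        · simp only [pvBoysN, pvGirlsN, List.countP_append, List.cons_append,
            List.countP_cons, List.countP_reverse]
          simp [hic]
          omega
    · exact List.Nodup.append hnd0 hnd1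
        (fun x hx0 hx1 => hmem1 x hx1 (List.mem_append_right _ hx0))
    · intro x hx
      rcases List.mem_append.1 hx with h | h
      · exact hdisj0 x h
      · exact fun hv => hmem1 x h (List.mem_append_left _ hv)
    · intro x hx y hy
      have key : x = current ∨ x ∈ (new0.reverse ++ rest) ++ new1 := by
        simp only [List.cons_append, List.mem_cons, List.mem_append, List.mem_reverse] at hx ⊢
        tauto
      rcases key with rfl | hx'
      · have h2 := hall0 y hy
        rcases List.mem_append.1 h2 with h | h
        · exact List.mem_append_left _ h
        · exact List.mem_append_right _ (List.mem_append_left _ h)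
      · have := hclo1 x hx' y hy
        simpa [List.append_assoc] using this
    · intro P hroot hcl x hx
      rcases List.mem_append.1 hx with h | h
      · exact hcl current x (hroot current List.mem_cons_self) (hmem0 x h).1 (hmem0 x h).2
      · refine hsound1 P ?_ ?_ x h
        · intro z hz
          rcases List.mem_append.1 hz with hz' | hz'
          · have hz0 := List.mem_reverse.1 hz'
            exact hcl current z (hroot current List.mem_cons_self) (hmem0 z hz0).1 (hmem0 z hz0).2
          · exact hroot z (List.mem_cons_of_mem _ hz')
        · intro a y hPa hy hnv
          exact hcl a y hPa hy (fun hv => hnv (List.mem_append_left _ hv))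

-- master invariant for B's frontier saturation
lemma pvBfsB_master (d : PySem.Dict Int (List Int)) (frontier : List Int)
    (seen : PySem.Set Int) (comp : List Int) :
    (∀ x ∈ frontier, x ∈ seen) → frontier.Nodup → seen.Nodup →
    ∃ new, pvBfsB d frontier seen comp = (seen ++ new, comp ++ new) ∧
      new.Nodup ∧ (∀ x ∈ new, x ∉ seen) ∧
      (∀ x ∈ frontier ++ new, ∀ y ∈ d.getD x [], y ∈ seen ++ new) ∧
      (∀ (P : Int → Prop), (∀ x ∈ frontier, P x) →
        (∀ x y, P x → y ∈ d.getD x [] → y ∉ seen → P y) → ∀ x ∈ new, P x) := by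
  fun_induction pvBfsB d frontier seen comp with
  | case1 seen comp =>
    intro _ _ _
    exact ⟨[], by simp, by simp, by simp, by simp, by simp⟩
  | case2 seen comp hd tl s ih =>
    intro hfs hfnd hsnd
    obtain ⟨new0, heq0, hnd0, hmem0, hall0⟩ := pvLevelB_spec d (hd :: tl) seen comp
    have hs : s = (seen ++ new0, comp ++ new0, new0) := heq0
    simp only [hs] at ih
    simp only [heq0]
    have hdisj0 : ∀ x ∈ new0, x ∉ seen := fun x hx => (hmem0 x hx).1
    have hfs' : ∀ x ∈ new0, x ∈ seen ++ new0 := fun x hx => List.mem_append_right _ hx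
    have hsnd' : (seen ++ new0).Nodup :=
      List.Nodup.append hsnd hnd0 (fun x hx hx0 => hdisj0 x hx0 hx)
    obtain ⟨new1, heq1, hnd1, hmem1, hclo1, hsound1⟩ := ih hfs' hnd0 hsnd'
    refine ⟨new0 ++ new1, ?_, ?_, ?_, ?_, ?_⟩
    · rw [heq1]
      simp [List.append_assoc]
    · exact List.Nodup.append hnd0 hnd1
        (fun x hx0 hx1 => hmem1 x hx1 (List.mem_append_right _ hx0))
    · intro x hx
      rcases List.mem_append.1 hx with h | h
      · exact hdisj0 x h
      · exact fun hv => hmem1 x h (List.mem_append_left _ hv)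
    · intro x hx y hy
      have key : x ∈ hd :: tl ∨ x ∈ new0 ++ new1 := by
        simpa using List.mem_append.1 hx
      rcases key with hxf | hx'
      · have h2 := hall0 x hxf y hy
        rcases List.mem_append.1 h2 with h | h
        · exact List.mem_append_left _ h
        · exact List.mem_append_right _ (List.mem_append_left _ h)
      · have h2 := hclo1 x (by simpa using hx') y hy
        rw [List.append_assoc] at h2
        exact h2
    · intro P hroot hcl x hx
      have hPnew0 : ∀ z ∈ new0, P z := by
        intro z hz
        obtain ⟨hzs, nd, hndf, hadj⟩ := hmem0 z hz
        exact hcl nd z (hroot nd hndf) hadj hzs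
      rcases List.mem_append.1 hx with h | h
      · exact hPnew0 x h
      · refine hsound1 P hPnew0 ?_ x h
        intro a y hPa hy hnv
        exact hcl a y hPa hy (fun hv => hnv (List.mem_append_left _ hv))

-- one component: A's walk and B's saturation produce membership-equal seen sets
-- and the same (boys, girls) numbers
lemma pvInner_eq (d : PySem.Dict Int (List Int)) (vA vB : List Int) (m : Int)
    (hA : vA.Nodup) (hB : vB.Nodup) (heqv : ∀ x, x ∈ vA ↔ x ∈ vB) (hm : m ∉ vA) :
    (pvDfsA d [m] (PySem.Set.add vA m) 0 0).1
        = ((pvBfsB d [m] (PySem.Set.add vB m) [m]).2.length : Int)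
          - (((pvBfsB d [m] (PySem.Set.add vB m) [m]).2.filter (fun x => PySem.Int.mod x 2 != 0)).length : Int) ∧
    (pvDfsA d [m] (PySem.Set.add vA m) 0 0).2.1
        = (((pvBfsB d [m] (PySem.Set.add vB m) [m]).2.filter (fun x => PySem.Int.mod x 2 != 0)).length : Int) ∧
    (∀ x, x ∈ (pvDfsA d [m] (PySem.Set.add vA m) 0 0).2.2 ↔ x ∈ (pvBfsB d [m] (PySem.Set.add vB m) [m]).1) ∧
    (pvDfsA d [m] (PySem.Set.add vA m) 0 0).2.2.Nodup ∧
    (pvBfsB d [m] (PySem.Set.add vB m) [m]).1.Nodup := by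
  have hmB : m ∉ vB := fun h => hm ((heqv m).2 h)
  have haddA : PySem.Set.add vA m = vA ++ [m] := by simp [hm]
  have haddB : PySem.Set.add vB m = vB ++ [m] := by simp [hmB]
  have hndA0 : (vA ++ [m]).Nodup := by
    simp [List.nodup_append, hA]
    intro a ha rfl; exact hm ha
  have hndB0 : (vB ++ [m]).Nodup := by
    simp [List.nodup_append, hB]
    intro a ha rfl; exact hmB ha
  obtain ⟨newA, heqA, hndA, hmemA, hcloA, hsoundA⟩ :=
    pvDfsA_master d [m] (vA ++ [m]) 0 0 (by simp) (by simp) hndA0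
  obtain ⟨newB, heqB, hndB, hmemB, hcloB, hsoundB⟩ :=
    pvBfsB_master d [m] (vB ++ [m]) [m] (by simp) (by simp) hndB0
  have hmnewA : m ∉ newA := fun h => hmemA m h (by simp)
  have hmnewB : m ∉ newB := fun h => hmemB m h (by simp)
  have hCAnd : (m :: newA).Nodup := List.Nodup.cons hmnewA hndA
  have hCBnd : (m :: newB).Nodup := List.Nodup.cons hmnewB hndB
  have sub1 : ∀ x ∈ newA, x ∈ m :: newB := by
    refine hsoundA (fun z => z ∈ m :: newB) (by simp) ?_
    intro a y hPa hy hny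
    have h2 := hcloB a (by simpa using hPa) y hy
    simp only [List.mem_append, List.mem_singleton] at h2
    rcases h2 with (h | h) | h
    · exact absurd (List.mem_append_left _ ((heqv y).2 h)) hny
    · exact absurd (List.mem_append_right _ (by simp [h])) hny
    · exact List.mem_cons_of_mem _ h
  have sub2 : ∀ x ∈ newB, x ∈ m :: newA := by
    refine hsoundB (fun z => z ∈ m :: newA) (by simp) ?_
    intro a y hPa hy hny
    have h2 := hcloA a (by simpa using hPa) y hy
    simp only [List.mem_append, List.mem_singleton] at h2
    rcases h2 with (h | h) | h
    · exact absurd (List.mem_append_left _ ((heqv y).1 h)) hny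
    · exact absurd (List.mem_append_right _ (by simp [h])) hny
    · exact List.mem_cons_of_mem _ h
  have hset : ∀ x, x ∈ m :: newA ↔ x ∈ m :: newB := by
    intro x
    constructor
    · intro hx
      rcases List.mem_cons.1 hx with rfl | hx'
      · exact List.mem_cons_self
      · exact sub1 x hx'
    · intro hx
      rcases List.mem_cons.1 hx with rfl | hx'
      · exact List.mem_cons_self
      · exact sub2 x hx'
  have hperm : (m :: newA).Perm (m :: newB) := (List.perm_ext_iff_of_nodup hCAnd hCBnd).2 hset
  have e1 : pvGirlsN (m :: newA) = pvGirlsN (m :: newB) := hperm.countP_eq _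
  have e2 : (m :: newA).length = (m :: newB).length := hperm.length_eq
  have e3 : (m :: newA).length = pvGirlsN (m :: newA) + pvBoysN (m :: newA) := by
    have h4 := List.length_eq_countP_add_countP (p := fun x => is_girl x) (l := m :: newA)
    simp only [decide_not, Bool.decide_eq_true] at h4
    exact h4
  have hgfilt : ∀ l : List Int,
      (l.filter (fun x => PySem.Int.mod x 2 != 0)).length = pvGirlsN l := by
    intro l
    rw [← List.countP_eq_length_filter]
    rfl
  refine ⟨?_, ?_, ?_, ?_, ?_⟩
  · simp only [haddA, haddB, heqA, heqB, List.singleton_append, hgfilt]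
    push_cast [List.cons_append] at e2 e3 ⊢
    omega
  · simp only [haddA, haddB, heqA, heqB, List.singleton_append, hgfilt]
    omega
  · intro x
    simp only [haddA, haddB, heqA, heqB]
    simp only [List.mem_append, List.mem_singleton]
    have h1 := heqv x
    have h2 := hset x
    simp only [List.mem_cons] at h2
    tauto
  · simp only [haddA, heqA]
    exact List.Nodup.append hndA0 hndA (fun x hx hx' => hmemA x hx' hx)
  · simp only [haddB, heqB]
    exact List.Nodup.append hndB0 hndB (fun x hx hx' => hmemB x hx' hx)

lemma pvOuter_eq (d : PySem.Dict Int (List Int)) (keys : List Int) (vA vB : List Int)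
    (t : List (Int × Int)) (hA : vA.Nodup) (hB : vB.Nodup)
    (heqv : ∀ x, x ∈ vA ↔ x ∈ vB) :
    pvOuterA d keys vA t = pvOuterB d keys vB t := by
  induction keys generalizing vA vB t with
  | nil => simp [pvOuterA, pvOuterB]
  | cons m ms ih =>
    simp only [pvOuterA, pvOuterB]
    by_cases hm : m ∈ vA
    · have hcA : PySem.Set.contains vA m = true := (PySem.Set.contains_iff vA m).2 hm
      have hcB : PySem.Set.contains vB m = true := (PySem.Set.contains_iff vB m).2 ((heqv m).1 hm)
      simp only [hcA, hcB, if_true]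
      exact ih vA vB t hA hB heqv
    · have hmB : m ∉ vB := fun h => hm ((heqv m).2 h)
      have hcA : PySem.Set.contains vA m = false := by
        rw [← Bool.not_eq_true, PySem.Set.contains_iff]; exact hm
      have hcB : PySem.Set.contains vB m = false := by
        rw [← Bool.not_eq_true, PySem.Set.contains_iff]; exact hmB
      simp only [hcA, hcB, Bool.false_eq_true, if_false]
      obtain ⟨e1, e2, e3, e4, e5⟩ := pvInner_eq d vA vB m hA hB heqv hm
      rw [e1, e2]
      exact ih _ _ _ e4 e5 e3

-- ===== VERDICT (by name: the statement is the Claim_ definition above) =====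
theorem compose_tribes_spec : Claim_equal_compose_tribes := by
  intro relations _ _
  unfold Spec_compose_tribes compose_tribes compose_tribes_alt
  exact pvOuter_eq _ _ _ _ _ List.nodup_nil List.nodup_nil (fun _ => Iff.rfl)
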